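-- pv_equiv track=rewrite | github.com/sagiriyo/kanna_connection_redive_2_python3.9 | support_query/util.py | ex_equip_exp2star
-- ===== SOURCE A (Python) =====
-- ex_equip_enhance_data = [
--     (150, 400, 800),
--     (150, 400, 800, 1300),
--     (800, 1800, 3000, 4400, 6000),  # 后面一样了
-- ]
--
-- def ex_equip_exp2star(exp: int, equipment_id: int) -> int:
--     if not equipment_id:
--         return 0
--     rank = equipment_id % 1000 // 100
--     rank = 2 if rank > 3 else rank - 1
--     exp_list = ex_equip_enhance_data[rank]
--     return next(
--         (i for i, star_exp in enumerate(exp_list) if exp < star_exp),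
--         len(exp_list),
--     )
-- ===== SOURCE B (Python) =====
-- import bisect
--
-- ex_equip_enhance_data = [
--     (150, 400, 800),
--     (150, 400, 800, 1300),
--     (800, 1800, 3000, 4400, 6000),
-- ]
--
-- def ex_equip_exp2star(exp: int, equipment_id: int) -> int:
--     if not equipment_id:
--         return 0
--     rank = equipment_id % 1000 // 100
--     exp_list = ex_equip_enhance_data[2 if rank > 3 else rank - 1]
--     return bisect.bisect_right(exp_list, exp)
-- ===== Notes on version B (the rewrite author's own statement) =====
-- stated objective: idiomatic
-- what changed: Replaces the left-to-right next(enumerate(...)) find-first scan over the threshold tuple with bisect.bisect_right, a binary search that returns the count of thresholds <= exp directly (the lists are strictly ascending, so the two coincide including ties and overflow).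
import Mathlib
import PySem

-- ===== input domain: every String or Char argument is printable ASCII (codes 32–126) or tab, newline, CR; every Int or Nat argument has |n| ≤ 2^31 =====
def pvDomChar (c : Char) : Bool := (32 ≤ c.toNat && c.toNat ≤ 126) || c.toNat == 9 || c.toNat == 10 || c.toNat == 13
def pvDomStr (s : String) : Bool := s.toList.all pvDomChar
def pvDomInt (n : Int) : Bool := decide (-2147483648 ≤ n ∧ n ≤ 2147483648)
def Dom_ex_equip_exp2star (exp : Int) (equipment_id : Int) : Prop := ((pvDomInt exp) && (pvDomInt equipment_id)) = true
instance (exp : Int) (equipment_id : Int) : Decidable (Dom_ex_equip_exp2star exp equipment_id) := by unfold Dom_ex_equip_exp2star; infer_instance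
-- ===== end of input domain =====

-- B replaces A's left-to-right next(enumerate(...)) find-first scan with bisect.bisect_right (idiomatic binary search; the lists are strictly ascending, so both return the count of thresholds <= exp).

-- ===== PORT A =====
-- module constant ex_equip_enhance_data (tuples ported as lists of Int)
def exEquipEnhanceData : List (List Int) :=
  [[150, 400, 800], [150, 400, 800, 1300], [800, 1800, 3000, 4400, 6000]]

-- next((i for i, star_exp in enumerate(exp_list) if exp < star_exp), len(exp_list))
def nextStarIdx (exp : Int) : List (Int × Int) → Option Int
  | [] => none
  | (i, s) :: rest => if exp < s then some i else nextStarIdx exp rest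

def ex_equip_exp2star (exp : Int) (equipment_id : Int) : Int :=
  if equipment_id == 0 then 0
  else
    let rank := PySem.Int.floordiv (PySem.Int.mod equipment_id 1000) 100
    let rank2 : Int := if rank > 3 then 2 else rank - 1
    -- rank2 ∈ {-1,0,1,2}: always in range for the 3-element list, so the pyGetD default is never used
    let expList := PySem.List.pyGetD exEquipEnhanceData rank2 []
    (nextStarIdx exp (PySem.List.enumerate expList 0)).getD (expList.length : Int)

-- ===== PORT B =====
def ex_equip_exp2star_alt (exp : Int) (equipment_id : Int) : Int :=
  if equipment_id == 0 then 0
  else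
    let rank := PySem.Int.floordiv (PySem.Int.mod equipment_id 1000) 100
    -- index ∈ {-1,0,1,2}: always in range, so the pyGetD default is never used
    let expList := PySem.List.pyGetD exEquipEnhanceData (if rank > 3 then 2 else rank - 1) []
    ((PySem.List.bisectRight expList exp : Nat) : Int)

-- ===== PRECONDITION & SPEC =====
def Spec_ex_equip_exp2star (exp : Int) (equipment_id : Int) (out : Int) : Prop := out = ex_equip_exp2star_alt exp equipment_id
instance (exp : Int) (equipment_id : Int) (out : Int) : Decidable (Spec_ex_equip_exp2star exp equipment_id out) := by unfold Spec_ex_equip_exp2star; infer_instance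

-- ===== CLAIM (what is proved, stated in full; the proofs are below) =====
def Claim_equal_ex_equip_exp2star : Prop := ∀ (exp : Int) (equipment_id : Int), Dom_ex_equip_exp2star exp equipment_id → Spec_ex_equip_exp2star exp equipment_id (ex_equip_exp2star exp equipment_id)

-- ===== LEMMAS AND PROOFS =====

-- A's generator scan over enumerate, rephrased through findIdx?.
theorem nextStarIdx_enumerate (exp : Int) (xs : List Int) (s : Int) :
    nextStarIdx exp (PySem.List.enumerate xs s)
      = (xs.findIdx? (fun v => decide (exp < v))).map (fun k => s + (k : Int)) := by
  induction xs generalizing s with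
  | nil => simp [PySem.List.enumerate_nil, nextStarIdx]
  | cons x xs ih =>
      rw [PySem.List.enumerate_cons, List.findIdx?_cons]
      by_cases h : exp < x
      · simp [nextStarIdx, h]
      · cases hf : xs.findIdx? (fun v => decide (exp < v)) with
        | none => simp [nextStarIdx, h, ih (s + 1), hf]
        | some k =>
            simp [nextStarIdx, h, ih (s + 1), hf]
            ring

-- On a (weakly) sorted list, the first index with exp < value — defaulting to the
-- length — is exactly bisect_right.
theorem scan_eq_bisectRight (exp : Int) (xs : List Int) (hs : xs.Pairwise (· ≤ ·)) :
    ((xs.findIdx? (fun v => decide (exp < v))).map (fun k => (0 : Int) + (k : Int))).getD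
        (xs.length : Int)
      = ((PySem.List.bisectRight xs exp : Nat) : Int) := by
  obtain ⟨h1, h2, h3⟩ := PySem.List.bisectRight_spec xs exp hs
  set r := PySem.List.bisectRight xs exp with hrdef
  by_cases hr : r < xs.length
  · have hfind : xs.findIdx? (fun v => decide (exp < v)) = some r := by
      rw [List.findIdx?_eq_some_iff_findIdx_eq]
      refine ⟨hr, (List.findIdx_eq hr).mpr ⟨?_, ?_⟩⟩
      · simpa using h3 r hr le_rfl
      · intro j hj
        simpa using not_lt.mpr (h2 j (lt_trans hj hr) hj)
    simp [hfind]
  · have hlen : r = xs.length := le_antisymm h1 (not_lt.mp hr)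
    have hfind : xs.findIdx? (fun v => decide (exp < v)) = none := by
      rw [List.findIdx?_eq_none_iff]
      intro x hx
      obtain ⟨j, hj, rfl⟩ := List.mem_iff_getElem.mp hx
      simpa using not_lt.mpr (h2 j hj (hlen ▸ hj))
    simp [hfind, hlen]

theorem ex_equip_exp2star_eq (exp equipment_id : Int) :
    ex_equip_exp2star exp equipment_id = ex_equip_exp2star_alt exp equipment_id := by
  unfold ex_equip_exp2star ex_equip_exp2star_alt
  by_cases h0 : equipment_id == 0
  · simp [h0]
  · simp only [h0]
    set m := PySem.Int.mod equipment_id 1000 with hm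
    have hm0 : 0 ≤ m := PySem.Int.mod_nonneg equipment_id (by norm_num)
    have hm1 : m < 1000 := PySem.Int.mod_lt equipment_id (by norm_num)
    have hr0 : (0 : Int) ≤ PySem.Int.floordiv m 100 :=
      (PySem.Int.le_floordiv_iff_mul_le (by norm_num)).mpr (by omega)
    have hr9 : PySem.Int.floordiv m 100 < 10 :=
      (PySem.Int.floordiv_lt_iff_lt_mul (by norm_num)).mpr (by omega)
    set rank := PySem.Int.floordiv m 100 with hrk
    set idx : Int := if rank > 3 then 2 else rank - 1 with hidx
    have hL : PySem.List.pyGetD exEquipEnhanceData idx ([] : List Int) = [150, 400, 800] ∨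
        PySem.List.pyGetD exEquipEnhanceData idx ([] : List Int) = [150, 400, 800, 1300] ∨
        PySem.List.pyGetD exEquipEnhanceData idx ([] : List Int) = [800, 1800, 3000, 4400, 6000] := by
      have : idx = -1 ∨ idx = 0 ∨ idx = 1 ∨ idx = 2 := by
        rw [hidx]; split_ifs with h <;> omega
      rcases this with h | h | h | h <;> rw [h] <;> simp [exEquipEnhanceData] <;> decide
    set L := PySem.List.pyGetD exEquipEnhanceData idx ([] : List Int) with hLdef
    have hsorted : L.Pairwise (· ≤ ·) := by
      rcases hL with h | h | h <;> rw [h] <;> decide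
    rw [nextStarIdx_enumerate, scan_eq_bisectRight exp L hsorted]

-- ===== VERDICT (by name: the statement is the Claim_ definition above) =====
theorem ex_equip_exp2star_spec : Claim_equal_ex_equip_exp2star := by
  intro exp equipment_id _
  unfold Spec_ex_equip_exp2star
  exact ex_equip_exp2star_eq exp equipment_id
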